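-- pv_equiv track=rewrite | github.com/gugOfBoat/vifoodKG | ViFoodVQA/src/scripts/export_hf_dataset.py | split_records
-- ===== SOURCE A (Python) =====
-- from typing import Any
--
-- def split_records(
--     records: list[dict[str, Any]],
--     split_map: dict[int, str],
-- ) -> dict[str, list[dict[str, Any]]]:
--     result: dict[str, list[dict[str, Any]]] = {
--         "train": [],
--         "validation": [],
--         "test": [],
--         "unknown": [],
--     }
--
--     for idx, item in enumerate(records):
--         split = split_map.get(idx, "unknown")
--         bucket = result.get(split, result["unknown"])
--         bucket.append(item)
--
--     return result
-- ===== SOURCE B (Python) =====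
-- def split_records(records, split_map):
--     names = [split_map.get(i, "unknown") for i in range(len(records))]
--     known = ("train", "validation", "test")
--     return {
--         "train": [r for r, s in zip(records, names) if s == "train"],
--         "validation": [r for r, s in zip(records, names) if s == "validation"],
--         "test": [r for r, s in zip(records, names) if s == "test"],
--         "unknown": [r for r, s in zip(records, names) if s not in known],
--     }
-- ===== Notes on version B (the rewrite author's own statement) =====
-- stated objective: alternative
-- what changed: A's single dispatch loop appending into a mutable four-bucket dict is replaced by computing the split name per index once and building each bucket with an independent filtering pass (unknown = name outside the three known splits).
import Mathlib
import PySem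

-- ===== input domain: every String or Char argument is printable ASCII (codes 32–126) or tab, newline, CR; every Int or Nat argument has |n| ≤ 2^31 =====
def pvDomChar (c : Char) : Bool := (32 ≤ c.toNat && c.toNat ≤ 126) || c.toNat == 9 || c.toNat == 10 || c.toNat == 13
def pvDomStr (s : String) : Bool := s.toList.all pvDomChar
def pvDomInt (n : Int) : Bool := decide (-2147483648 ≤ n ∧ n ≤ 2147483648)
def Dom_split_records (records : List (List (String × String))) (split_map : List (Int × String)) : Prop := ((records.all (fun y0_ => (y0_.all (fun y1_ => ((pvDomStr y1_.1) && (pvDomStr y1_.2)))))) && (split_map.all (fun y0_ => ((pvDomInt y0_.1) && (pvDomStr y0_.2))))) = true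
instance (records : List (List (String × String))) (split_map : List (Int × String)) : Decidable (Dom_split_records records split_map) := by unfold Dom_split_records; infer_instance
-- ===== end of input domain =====

-- B replaces A's single dispatch loop over a mutable dict by one bucket-independent
-- filtering pass per split name (objective: alternative decomposition, same cost).

-- ===== PORT A =====
-- Python's `bucket = result.get(split, result["unknown"]); bucket.append(item)` mutates the
-- aliased list in place: the append lands on result[split] when the key exists, else on
-- result["unknown"].  Ported exactly as a Dict.modify on that key.
def split_records (records : List (List (String × String))) (split_map : List (Int × String)) : List (String × List (List (String × String))) :=
  let result : PySem.Dict String (List (List (String × String))) :=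
    PySem.Dict.ofList [("train", []), ("validation", []), ("test", []), ("unknown", [])]
  let sm : PySem.Dict Int String := PySem.Dict.ofList split_map
  ((PySem.List.enumerate records 0).foldl (fun d p =>
      let split := sm.getD p.1 "unknown"
      let key := if d.contains split then split else "unknown"
      d.modify key [] (· ++ [p.2])) result).items

-- ===== PORT B =====
def split_records_alt (records : List (List (String × String))) (split_map : List (Int × String)) : List (String × List (List (String × String))) :=
  let sm : PySem.Dict Int String := PySem.Dict.ofList split_map
  let names := (PySem.List.pyRange 0 records.length 1).map (fun i => sm.getD i "unknown")
  let pairs := records.zip names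
  [("train", (pairs.filter (fun p => p.2 == "train")).map (·.1)),
   ("validation", (pairs.filter (fun p => p.2 == "validation")).map (·.1)),
   ("test", (pairs.filter (fun p => p.2 == "test")).map (·.1)),
   ("unknown", (pairs.filter (fun p => !(p.2 == "train" || p.2 == "validation" || p.2 == "test"))).map (·.1))]

-- ===== PRECONDITION & SPEC =====
def Spec_split_records (records : List (List (String × String))) (split_map : List (Int × String)) (out : List (String × List (List (String × String)))) : Prop := out = split_records_alt records split_map
instance (records : List (List (String × String))) (split_map : List (Int × String)) (out : List (String × List (List (String × String)))) : Decidable (Spec_split_records records split_map out) := by unfold Spec_split_records; infer_instance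

-- ===== CLAIM (what is proved, stated in full; the proofs are below) =====
def Claim_equal_split_records : Prop := ∀ (records : List (List (String × String))) (split_map : List (Int × String)), Dom_split_records records split_map → Spec_split_records records split_map (split_records records split_map)

-- ===== LEMMAS AND PROOFS =====

-- the split name Python computes for each index, rendered structurally on the record list
def pvNamesFrom (sm : PySem.Dict Int String) (i : Int) : List (List (String × String)) → List String
  | [] => []
  | _ :: rs => sm.getD i "unknown" :: pvNamesFrom sm (i + 1) rs

lemma pvNames_pyRange (sm : PySem.Dict Int String) :
    ∀ (rs : List (List (String × String))) (i : Int),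
      (PySem.List.pyRange i (i + rs.length) 1).map (fun j => sm.getD j "unknown") = pvNamesFrom sm i rs := by
  intro rs
  induction rs with
  | nil =>
    intro i
    have h0 : i + (([] : List (List (String × String))).length : Int) = i := by simp
    rw [h0, PySem.List.pyRange_one_eq_nil (le_refl i)]
    simp [pvNamesFrom]
  | cons r rs ih =>
    intro i
    have hlt : i < i + ((r :: rs).length : Int) := by simp only [List.length_cons]; omega
    rw [PySem.List.pyRange_one_cons hlt]
    simp only [List.map_cons, pvNamesFrom]
    congr 1
    have harg : i + (↑(r :: rs).length) = (i + 1) + (rs.length : Int) := by push_cast [List.length_cons]; ring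
    rw [harg]
    exact ih (i + 1)

lemma pv_loop_inv (sm : PySem.Dict Int String) :
    ∀ (rs : List (List (String × String))) (i : Int)
      (t v te u : List (List (String × String))),
      ((PySem.List.enumerate rs i).foldl (fun d p =>
          let split := sm.getD p.1 "unknown"
          let key := if d.contains split then split else "unknown"
          d.modify key [] (· ++ [p.2]))
        (PySem.Dict.mk [("train", t), ("validation", v), ("test", te), ("unknown", u)])).items
      = [("train", t ++ (((rs.zip (pvNamesFrom sm i rs)).filter (fun p => p.2 == "train")).map (·.1))),
         ("validation", v ++ (((rs.zip (pvNamesFrom sm i rs)).filter (fun p => p.2 == "validation")).map (·.1))),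
         ("test", te ++ (((rs.zip (pvNamesFrom sm i rs)).filter (fun p => p.2 == "test")).map (·.1))),
         ("unknown", u ++ (((rs.zip (pvNamesFrom sm i rs)).filter (fun p => !(p.2 == "train" || p.2 == "validation" || p.2 == "test"))).map (·.1)))] := by
  intro rs
  induction rs with
  | nil => intro i t v te u; simp [pvNamesFrom, PySem.List.enumerate_nil]
  | cons r rs ih =>
    intro i t v te u
    rw [PySem.List.enumerate_cons, List.foldl_cons]
    simp only [pvNamesFrom, List.zip_cons_cons, List.filter_cons]
    generalize hsp : sm.getD i "unknown" = sp
    by_cases h1 : sp = "train"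
    · subst h1
      have hd : (PySem.Dict.mk [("train", t), ("validation", v), ("test", te), ("unknown", u)]).modify
          (if (PySem.Dict.mk [("train", t), ("validation", v), ("test", te), ("unknown", u)]).contains "train" = true
            then "train" else "unknown") [] (fun x => x ++ [r])
          = PySem.Dict.mk [("train", t ++ [r]), ("validation", v), ("test", te), ("unknown", u)] := by
        simp [PySem.Dict.modify, PySem.Dict.contains, PySem.Dict.get?, PySem.Dict.getD, PySem.Dict.insert]
      rw [hd, ih (i + 1) (t ++ [r]) v te u]
      simp
    · by_cases h2 : sp = "validation"
      · subst h2
        have hd : (PySem.Dict.mk [("train", t), ("validation", v), ("test", te), ("unknown", u)]).modify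
            (if (PySem.Dict.mk [("train", t), ("validation", v), ("test", te), ("unknown", u)]).contains "validation" = true
              then "validation" else "unknown") [] (fun x => x ++ [r])
            = PySem.Dict.mk [("train", t), ("validation", v ++ [r]), ("test", te), ("unknown", u)] := by
          simp [PySem.Dict.modify, PySem.Dict.contains, PySem.Dict.get?, PySem.Dict.getD, PySem.Dict.insert]
        rw [hd, ih (i + 1) t (v ++ [r]) te u]
        simp
      · by_cases h3 : sp = "test"
        · subst h3
          have hd : (PySem.Dict.mk [("train", t), ("validation", v), ("test", te), ("unknown", u)]).modify
              (if (PySem.Dict.mk [("train", t), ("validation", v), ("test", te), ("unknown", u)]).contains "test" = true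
                then "test" else "unknown") [] (fun x => x ++ [r])
              = PySem.Dict.mk [("train", t), ("validation", v), ("test", te ++ [r]), ("unknown", u)] := by
            simp [PySem.Dict.modify, PySem.Dict.contains, PySem.Dict.get?, PySem.Dict.getD, PySem.Dict.insert]
          rw [hd, ih (i + 1) t v (te ++ [r]) u]
          simp
        · have hd : (PySem.Dict.mk [("train", t), ("validation", v), ("test", te), ("unknown", u)]).modify
              (if (PySem.Dict.mk [("train", t), ("validation", v), ("test", te), ("unknown", u)]).contains sp = true
                then sp else "unknown") [] (fun x => x ++ [r])
              = PySem.Dict.mk [("train", t), ("validation", v), ("test", te), ("unknown", u ++ [r])] := by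
            by_cases h4 : sp = "unknown"
            · subst h4
              simp [PySem.Dict.modify, PySem.Dict.contains, PySem.Dict.get?, PySem.Dict.getD, PySem.Dict.insert]
            · simp [Ne.symm h1, Ne.symm h2, Ne.symm h3, Ne.symm h4,
                    PySem.Dict.modify, PySem.Dict.contains, PySem.Dict.get?, PySem.Dict.getD, PySem.Dict.insert]
          rw [hd, ih (i + 1) t v te (u ++ [r])]
          simp [h1, h2, h3]

-- ===== VERDICT (by name: the statement is the Claim_ definition above) =====
theorem split_records_spec : Claim_equal_split_records := by
  intro records split_map _
  unfold Spec_split_records split_records split_records_alt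
  simp only []
  rw [show (PySem.List.pyRange 0 (records.length : Int) 1)
        = PySem.List.pyRange 0 (0 + (records.length : Int)) 1 by ring_nf,
      pvNames_pyRange (PySem.Dict.ofList split_map) records 0]
  have := pv_loop_inv (PySem.Dict.ofList split_map) records 0 [] [] [] []
  simpa [PySem.Dict.ofList] using this
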